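-- pv_equiv track=rewrite | github.com/Dimaaap/Leetcode | Easy/1598.)Crawler New Folder.py | min_operators
-- ===== SOURCE A (Python) =====
-- def min_operators(logs: list[str]):
--     deep = 0
--     for dir_folder in logs:
--         if dir_folder == '../':
--             deep -= 1
--         elif dir_folder == './':
--             continue
--         else:
--             deep += 1
--     return deep
-- ===== SOURCE B (Python) =====
-- def min_operators(logs: list[str]):
--     # Divide and conquer: the depth change of a log sequence is the sum of the
--     # depth changes of its halves; a singleton contributes -1, 0 or +1.
--     if not logs:
--         return 0
--     if len(logs) == 1:
--         s = logs[0]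
--         return -1 if s == '../' else 0 if s == './' else 1
--     mid = len(logs) // 2
--     return min_operators(logs[:mid]) + min_operators(logs[mid:])
-- ===== Notes on version B (the rewrite author's own statement) =====
-- stated objective: alternative
-- what changed: Replaced the single-pass branching accumulator with a divide-and-conquer recursion: split the log list in halves, recursively compute each half's depth change and add them, with singletons scored -1/0/+1.
import Mathlib
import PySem

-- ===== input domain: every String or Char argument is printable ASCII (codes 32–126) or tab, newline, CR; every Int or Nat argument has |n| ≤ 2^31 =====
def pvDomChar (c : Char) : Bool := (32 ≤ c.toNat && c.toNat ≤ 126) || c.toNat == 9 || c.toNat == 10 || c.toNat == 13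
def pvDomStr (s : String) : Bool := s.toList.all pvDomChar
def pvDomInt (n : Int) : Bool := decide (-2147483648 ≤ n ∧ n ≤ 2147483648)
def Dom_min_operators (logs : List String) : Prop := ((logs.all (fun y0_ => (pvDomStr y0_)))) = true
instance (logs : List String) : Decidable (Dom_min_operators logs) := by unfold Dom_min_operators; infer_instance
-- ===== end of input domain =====

-- ===== PORT A =====
-- B replaces A's single-pass branching accumulator with a divide-and-conquer recursion over halves (objective: alternative).
def min_operators (logs : List String) : Int :=
  logs.foldl (fun deep dir_folder =>
    if dir_folder == "../" then deep - 1
    else if dir_folder == "./" then deep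
    else deep + 1) 0

-- ===== PORT B =====
-- B: split the list in halves, recurse, add; singleton scores -1/0/+1 (logs[:mid] ~ take, logs[mid:] ~ drop).
def min_operators_alt (logs : List String) : Int :=
  match logs with
  | [] => 0
  | [s] => if s == "../" then -1 else if s == "./" then 0 else 1
  | a :: b :: t =>
      let l := a :: b :: t
      let mid := l.length / 2
      min_operators_alt (l.take mid) + min_operators_alt (l.drop mid)
termination_by logs.length
decreasing_by
  · simp; omega
  · simp; omega

-- ===== PRECONDITION & SPEC =====
def Spec_min_operators (logs : List String) (out : Int) : Prop := out = min_operators_alt logs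
instance (logs : List String) (out : Int) : Decidable (Spec_min_operators logs out) := by unfold Spec_min_operators; infer_instance

-- ===== CLAIM (what is proved, stated in full; the proofs are below) =====
def Claim_equal_min_operators : Prop := ∀ (logs : List String), Dom_min_operators logs → Spec_min_operators logs (min_operators logs)

-- ===== LEMMAS AND PROOFS =====
def pvDelta (s : String) : Int :=
  if s == "../" then -1 else if s == "./" then 0 else 1

theorem alt_eq_sum (logs : List String) :
    min_operators_alt logs = (logs.map pvDelta).sum := by
  induction hn : logs.length using Nat.strong_induction_on generalizing logs with
  | _ n ih =>
    match logs with
    | [] => simp [min_operators_alt]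
    | [s] => simp [min_operators_alt, pvDelta]
    | a :: b :: t =>
        rw [min_operators_alt]
        rw [ih _ (by subst hn; simp; omega) _ rfl, ih _ (by subst hn; simp; omega) _ rfl]
        rw [← List.sum_append, ← List.map_append, List.take_append_drop]

theorem foldl_eq_sum (logs : List String) (d : Int) :
    logs.foldl (fun deep dir_folder =>
      if dir_folder == "../" then deep - 1
      else if dir_folder == "./" then deep
      else deep + 1) d = d + (logs.map pvDelta).sum := by
  induction logs generalizing d with
  | nil => simp
  | cons h t ih =>
      simp only [List.foldl, List.map, List.sum_cons, ih, pvDelta]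
      split_ifs <;> ring

-- ===== VERDICT (by name: the statement is the Claim_ definition above) =====
theorem min_operators_spec : Claim_equal_min_operators := by
  intro logs _
  unfold Spec_min_operators min_operators
  rw [foldl_eq_sum, alt_eq_sum]
  ring
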